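-- pv_equiv track=rewrite | github.com/pypi-data/pypi-mirror-360 | packages/memorydiagnostictool/memorydiagnostictool-0.18.0.tar.gz/memorydiagnostictool-0.18.0/MemoryDiagnosticTool/Trained_LOG_CSV.py | get_bios_hostname
-- ===== SOURCE A (Python) =====
-- def get_bios_hostname(base):
--     bios = ""
--     hostname = ""
--     text = base.split("_")
--     if len(text)>1:
--         bios = text[0]
--         hostname = text[1]
--     for item in text:
--         if item.startswith("V"):
--             bios = item
--         if ("congo" in item) or ("morocco" in item) or ("kenya" in item):
--             hostname = item
--     return bios, hostname
-- ===== SOURCE B (Python) =====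
-- def get_bios_hostname(base):
--     text = base.split("_")
--     bios = None
--     hostname = None
--     for item in reversed(text):
--         if bios is None and item.startswith("V"):
--             bios = item
--         if hostname is None and ("congo" in item or "morocco" in item or "kenya" in item):
--             hostname = item
--         if bios is not None and hostname is not None:
--             break
--     if bios is None:
--         bios = text[0] if len(text) > 1 else ""
--     if hostname is None:
--         hostname = text[1] if len(text) > 1 else ""
--     return bios, hostname
-- ===== Notes on version B (the rewrite author's own statement) =====
-- stated objective: alternative
-- what changed: Replaces A's forward pass that keeps overwriting bios/hostname with a single backward scan that takes the first match from the right and stops early once both are found, falling back to text[0]/text[1] only when no candidate exists.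
import Mathlib
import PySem

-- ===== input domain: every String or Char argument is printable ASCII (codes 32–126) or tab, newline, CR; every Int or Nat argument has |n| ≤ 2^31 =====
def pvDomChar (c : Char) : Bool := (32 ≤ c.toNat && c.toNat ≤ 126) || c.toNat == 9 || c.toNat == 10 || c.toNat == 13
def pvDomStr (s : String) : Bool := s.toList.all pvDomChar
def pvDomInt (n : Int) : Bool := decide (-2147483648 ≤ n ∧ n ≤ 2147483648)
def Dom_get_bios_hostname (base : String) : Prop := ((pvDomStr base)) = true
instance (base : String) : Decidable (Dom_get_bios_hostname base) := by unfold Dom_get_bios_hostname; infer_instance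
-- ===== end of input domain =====

-- B replaces A's forward overwrite loop by a backward scan with early exit (alternative decomposition, same cost).

-- ===== PORT A =====
def get_bios_hostname (base : String) : String × String :=
  let text := (PySem.Str.split? base "_").getD []
  let init : String × String :=
    if 1 < text.length then
      ((PySem.List.pyGet? text 0).getD "", (PySem.List.pyGet? text 1).getD "")
    else ("", "")
  text.foldl (fun st item =>
    let bios := if PySem.Str.startswith item "V" then item else st.1
    let hostname :=
      if PySem.Str.isIn "congo" item || PySem.Str.isIn "morocco" item || PySem.Str.isIn "kenya" item
      then item else st.2
    (bios, hostname)) init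

-- ===== PORT B =====
def pVtok (s : String) : Bool := PySem.Str.startswith s "V"
def pHtok (s : String) : Bool :=
  PySem.Str.isIn "congo" s || PySem.Str.isIn "morocco" s || PySem.Str.isIn "kenya" s

-- backward scan: first match from the given list, early break once both found
def scanBack : List String → Option String → Option String → Option String × Option String
  | [], b, h => (b, h)
  | item :: rest, b, h =>
    let b' := if b.isNone && pVtok item then some item else b
    let h' := if h.isNone && pHtok item then some item else h
    if b'.isSome && h'.isSome then (b', h') else scanBack rest b' h'

def get_bios_hostname_alt (base : String) : String × String :=
  let text := (PySem.Str.split? base "_").getD []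
  let (b, h) := scanBack text.reverse none none
  ( b.getD (if 1 < text.length then (PySem.List.pyGet? text 0).getD "" else ""),
    h.getD (if 1 < text.length then (PySem.List.pyGet? text 1).getD "" else "") )

-- ===== PRECONDITION & SPEC =====
def Spec_get_bios_hostname (base : String) (out : String × String) : Prop := out = get_bios_hostname_alt base
instance (base : String) (out : String × String) : Decidable (Spec_get_bios_hostname base out) := by unfold Spec_get_bios_hostname; infer_instance

-- ===== CLAIM (what is proved, stated in full; the proofs are below) =====
def Claim_equal_get_bios_hostname : Prop := ∀ (base : String), Dom_get_bios_hostname base → Spec_get_bios_hostname base (get_bios_hostname base)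

-- ===== LEMMAS AND PROOFS =====
theorem foldl_sel (p q : String → Bool) (l : List String) (b0 h0 : String) :
    l.foldl (fun st item =>
      (if p item then item else st.1, if q item then item else st.2)) (b0, h0)
    = ((l.reverse.find? p).getD b0, (l.reverse.find? q).getD h0) := by
  induction l generalizing b0 h0 with
  | nil => simp
  | cons x xs ih =>
    simp only [List.foldl_cons, ih, List.reverse_cons, List.find?_append, Prod.mk.injEq]
    constructor
    · cases h : xs.reverse.find? p <;> simp [List.find?] <;> split <;> simp_all
    · cases h : xs.reverse.find? q <;> simp [List.find?] <;> split <;> simp_all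

theorem scanBack_eq (l : List String) (b h : Option String) :
    scanBack l b h = (b.or (l.find? pVtok), h.or (l.find? pHtok)) := by
  induction l generalizing b h with
  | nil => simp [scanBack]
  | cons x xs ih =>
    simp only [scanBack, ih, List.find?]
    cases b <;> cases h <;> by_cases hv : pVtok x <;> by_cases hh : pHtok x <;>
      simp [hv, hh, Option.or]

theorem main_proof (base : String) : Spec_get_bios_hostname base (get_bios_hostname base) := by
  unfold Spec_get_bios_hostname get_bios_hostname get_bios_hostname_alt
  simp only [scanBack_eq, Option.none_or]
  have := foldl_sel pVtok pHtok ((PySem.Str.split? base "_").getD [])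
  simp only [pVtok, pHtok] at this
  split_ifs with hc
  · exact this _ _
  · exact this _ _

-- ===== VERDICT (by name: the statement is the Claim_ definition above) =====
theorem get_bios_hostname_spec : Claim_equal_get_bios_hostname := fun base _ => main_proof base
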